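-- pv_equiv track=rewrite | github.com/HarivaradhanKM/Python_Coding | IDP - Answers/IDP 3 Easy 2.py | get_required_words
-- ===== SOURCE A (Python) =====
-- def get_required_words(words, strings):
--     result = 0
--     for each_word in words:
--         for each_string in strings:
--             in_same_string = True
--             for each_letter in each_word:
--                 if not each_letter.lower() in each_string:
--                     in_same_string = False
--                     break
--             if in_same_string:
--                 result += 1
--                 break
--
--     return result
-- ===== SOURCE B (Python) =====
-- def get_required_words(words, strings):
--     # assign each character seen in the strings a bit position; encode each string
--     # as a bitmask of the characters it contains
--     pos = {}
--     masks = []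
--     for s in strings:
--         m = 0
--         for ch in s:
--             b = pos.get(ch)
--             if b is None:
--                 b = len(pos)
--                 pos[ch] = b
--             m |= 1 << b
--         masks.append(m)
--     count = 0
--     for word in words:
--         wm = 0
--         ok = True
--         for letter in word:
--             b = pos.get(letter.lower())
--             if b is None:
--                 ok = False  # letter occurs in no string
--                 break
--             wm |= 1 << b
--         if ok and any(sm & wm == wm for sm in masks):
--             count += 1
--     return count
-- ===== Notes on version B (the rewrite author's own statement) =====
-- stated objective: alternative
-- what changed: Replaces A's triple nested scan (each word against each string, substring-testing every letter) by a bitset encoding: each string is summarized once as a bitmask of its characters, each word's lowered letters become one mask, and the per-string test is a single mask intersection (sm & wm == wm) with words containing a letter absent from every string rejected without scanning.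
import Mathlib
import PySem

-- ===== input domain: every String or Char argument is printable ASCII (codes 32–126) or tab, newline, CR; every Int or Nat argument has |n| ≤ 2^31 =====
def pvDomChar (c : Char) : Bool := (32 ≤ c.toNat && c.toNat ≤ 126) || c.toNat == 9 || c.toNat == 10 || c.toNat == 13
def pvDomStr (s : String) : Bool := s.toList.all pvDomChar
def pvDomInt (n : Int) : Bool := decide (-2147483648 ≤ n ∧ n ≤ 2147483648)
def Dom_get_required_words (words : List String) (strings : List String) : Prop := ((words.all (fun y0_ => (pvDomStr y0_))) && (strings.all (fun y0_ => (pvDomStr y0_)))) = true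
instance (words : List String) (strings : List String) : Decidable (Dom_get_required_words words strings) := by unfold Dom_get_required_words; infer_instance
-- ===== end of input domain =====

-- B replaces A's triple nested scan by bitmasks: each string is encoded once as a bitmask of its
-- characters and each word's lowered letters become one mask, tested per string with a single '&'
-- (alternative algorithm; same return value).

-- ===== PORT A =====
-- inner letter loop: 'in_same_string' with break
def pvAWordOk : List Char → List Char → Bool
  | [], _ => true
  | c :: rest, s =>
    if !(PySem.Chars.isIn (PySem.Chars.lower [c]) s) then false
    else pvAWordOk rest s

-- middle loop over strings with 'result += 1; break': returns whether a string matched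
def pvAFind (w : List Char) : List String → Bool
  | [] => false
  | s :: rest => if pvAWordOk w s.toList then true else pvAFind w rest

def get_required_words (words : List String) (strings : List String) : Int :=
  words.foldl (fun result each_word =>
    if pvAFind each_word.toList strings then result + 1 else result) 0

-- ===== PORT B =====
-- body of the char loop: 'b = pos.get(ch); if b is None: b = len(pos); pos[ch] = b; m |= 1 << b'
-- (masks are nonnegative Python ints, so Nat bit operations are exact)
def pvBStep (acc : PySem.Dict Char Nat × Nat) (ch : Char) : PySem.Dict Char Nat × Nat :=
  match acc.1.get? ch with
  | none => (acc.1.insert ch acc.1.size, acc.2 ||| (1 <<< acc.1.size))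
  | some b => (acc.1, acc.2 ||| (1 <<< b))

-- the first loop of B: builds pos and the list of per-string masks
def pvBBuild (strings : List String) : PySem.Dict Char Nat × List Nat :=
  strings.foldl (fun pm s =>
    let r := s.toList.foldl pvBStep (pm.1, 0)
    (r.1, pm.2 ++ [r.2])) (PySem.Dict.empty, [])

-- the letter loop: word mask, none = 'ok = False' (some letter occurs in no string)
def pvBWordMask (pos : PySem.Dict Char Nat) : List Char → Nat → Option Nat
  | [], wm => some wm
  | c :: rest, wm =>
    match pos.get? (PySem.Chars.lowerChar c) with
    | none => none
    | some b => pvBWordMask pos rest (wm ||| (1 <<< b))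

def get_required_words_alt (words : List String) (strings : List String) : Int :=
  let pm := pvBBuild strings
  words.foldl (fun count word =>
    match pvBWordMask pm.1 word.toList 0 with
    | none => count
    | some wm => if pm.2.any (fun sm => sm &&& wm == wm) then count + 1 else count) 0

-- ===== PRECONDITION & SPEC =====
def Spec_get_required_words (words : List String) (strings : List String) (out : Int) : Prop := out = get_required_words_alt words strings
instance (words : List String) (strings : List String) (out : Int) : Decidable (Spec_get_required_words words strings out) := by unfold Spec_get_required_words; infer_instance

-- ===== CLAIM (what is proved, stated in full; the proofs are below) =====
def Claim_equal_get_required_words : Prop := ∀ (words : List String) (strings : List String), Dom_get_required_words words strings → Spec_get_required_words words strings (get_required_words words strings)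

-- ===== LEMMAS AND PROOFS =====

-- a well-formed position dict: values bounded by its size and injective
def PvPosGood (pos : PySem.Dict Char Nat) : Prop :=
  (∀ c b, pos.get? c = some b → b < pos.size) ∧
  (∀ c c' b, pos.get? c = some b → pos.get? c' = some b → c = c')

def PvExt (p q : PySem.Dict Char Nat) : Prop :=
  ∀ c b, p.get? c = some b → q.get? c = some b

lemma pvAWordOk_eq_all (w s : List Char) :
    pvAWordOk w s = w.all (fun c => PySem.Chars.isIn [PySem.Chars.lowerChar c] s) := by
  induction w with
  | nil => rfl
  | cons c rest ih => simp [pvAWordOk, PySem.Chars.lower, ih]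

lemma pvAFind_eq_any (w : List Char) (ss : List String) :
    pvAFind w ss = ss.any (fun s => pvAWordOk w s.toList) := by
  induction ss with
  | nil => rfl
  | cons s rest ih => simp [pvAFind, ih]

-- single-character substring test is membership
lemma isIn_singleton (c : Char) (s : List Char) :
    PySem.Chars.isIn [c] s = true ↔ c ∈ s := by
  rw [PySem.Chars.isIn_iff_infix]
  constructor
  · intro h; exact h.mem (by simp)
  · intro h
    obtain ⟨l, r, rfl⟩ := List.append_of_mem h
    exact ⟨l, r, by simp⟩

lemma testBit_or_shift (m b i : Nat) :
    (m ||| (1 <<< b)).testBit i = true ↔ m.testBit i = true ∨ i = b := by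
  rw [Nat.testBit_or, Nat.shiftLeft_eq, one_mul, Nat.testBit_two_pow]
  rcases h : m.testBit i <;> simp [eq_comm]

-- the char loop from any good state: preserves goodness, extends pos, adds exactly cs to the
-- domain, and the mask collects exactly the positions of the chars of cs
lemma pvCharFold (cs : List Char) (pos : PySem.Dict Char Nat) (m : Nat) (hg : PvPosGood pos) :
    PvPosGood (cs.foldl pvBStep (pos, m)).1 ∧
    PvExt pos (cs.foldl pvBStep (pos, m)).1 ∧
    (∀ c, (cs.foldl pvBStep (pos, m)).1.contains c = true ↔ pos.contains c = true ∨ c ∈ cs) ∧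
    (∀ i, (cs.foldl pvBStep (pos, m)).2.testBit i = true ↔
      m.testBit i = true ∨ ∃ ch ∈ cs, (cs.foldl pvBStep (pos, m)).1.get? ch = some i) := by
  induction cs generalizing pos m with
  | nil => exact ⟨hg, fun _ _ h => h, by simp, by simp⟩
  | cons ch rest ih =>
    rcases hch : pos.get? ch with _ | b
    · -- fresh key: insert at position pos.size
      have hnc : pos.contains ch = false := (PySem.Dict.get?_eq_none_iff_contains pos ch).mp hch
      have hsize : (pos.insert ch pos.size).size = pos.size + 1 := by
        rw [PySem.Dict.size_insert, hnc]; simp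
      have hg1 : PvPosGood (pos.insert ch pos.size) := by
        constructor
        · intro c b h
          rw [PySem.Dict.get?_insert] at h
          rw [hsize]
          split_ifs at h with hc
          · injection h with h; omega
          · exact Nat.lt_succ_of_lt (hg.1 c b h)
        · intro c c' b h h'
          rw [PySem.Dict.get?_insert] at h h'
          split_ifs at h h' with hc hc'
          · exact hc.trans hc'.symm
          · injection h with h; exact absurd (hg.1 c' b h') (by omega)
          · injection h' with h'; exact absurd (hg.1 c b h) (by omega)
          · exact hg.2 c c' b h h'
      have hext1 : PvExt pos (pos.insert ch pos.size) := by
        intro c b h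
        rw [PySem.Dict.get?_insert]
        split_ifs with hc
        · subst hc; rw [hch] at h; cases h
        · exact h
      have hstep : (ch :: rest).foldl pvBStep (pos, m)
          = rest.foldl pvBStep (pos.insert ch pos.size, m ||| (1 <<< pos.size)) := by
        simp [pvBStep, hch]
      obtain ⟨g2, e2, d2, b2⟩ := ih (pos.insert ch pos.size) (m ||| (1 <<< pos.size)) hg1
      rw [hstep]
      refine ⟨g2, fun c b h => e2 c b (hext1 c b h), ?_, ?_⟩
      · intro c
        rw [d2 c, PySem.Dict.contains_insert]
        constructor
        · rintro (h | h)
          · rcases (Bool.or_eq_true _ _).mp h with h | h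
            · exact Or.inr (by simp_all)
            · exact Or.inl h
          · exact Or.inr (List.mem_cons_of_mem _ h)
        · rintro (h | h)
          · exact Or.inl (by simp [h])
          · rcases List.mem_cons.mp h with rfl | h
            · exact Or.inl (by simp)
            · exact Or.inr h
      · intro i
        have hchF : ((rest.foldl pvBStep (pos.insert ch pos.size, m ||| (1 <<< pos.size))).1).get? ch
            = some pos.size := e2 ch pos.size (by rw [PySem.Dict.get?_insert]; simp)
        rw [b2 i, testBit_or_shift]
        constructor
        · rintro ((h | rfl) | ⟨c, hc, h⟩)
          · exact Or.inl h
          · exact Or.inr ⟨ch, by simp, hchF⟩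
          · exact Or.inr ⟨c, List.mem_cons_of_mem _ hc, h⟩
        · rintro (h | ⟨c, hc, h⟩)
          · exact Or.inl (Or.inl h)
          · rcases List.mem_cons.mp hc with rfl | hc
            · rw [hchF] at h
              exact Or.inl (Or.inr (by injection h; omega))
            · exact Or.inr ⟨c, hc, h⟩
    · -- known key at position b
      have hstep : (ch :: rest).foldl pvBStep (pos, m)
          = rest.foldl pvBStep (pos, m ||| (1 <<< b)) := by
        simp [pvBStep, hch]
      obtain ⟨g2, e2, d2, b2⟩ := ih pos (m ||| (1 <<< b)) hg
      rw [hstep]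
      refine ⟨g2, e2, ?_, ?_⟩
      · intro c
        rw [d2 c]
        have hcc : pos.contains ch = true := by
          rw [← Bool.not_eq_false, ← PySem.Dict.get?_eq_none_iff_contains, hch]; simp
        constructor
        · rintro (h | h)
          · exact Or.inl h
          · exact Or.inr (List.mem_cons_of_mem _ h)
        · rintro (h | h)
          · exact Or.inl h
          · rcases List.mem_cons.mp h with rfl | h
            · exact Or.inl hcc
            · exact Or.inr h
      · intro i
        have hchF : ((rest.foldl pvBStep (pos, m ||| (1 <<< b))).1).get? ch = some b :=
          e2 ch b hch
        rw [b2 i, testBit_or_shift]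
        constructor
        · rintro ((h | rfl) | ⟨c, hc, h⟩)
          · exact Or.inl h
          · exact Or.inr ⟨ch, by simp, hchF⟩
          · exact Or.inr ⟨c, List.mem_cons_of_mem _ hc, h⟩
        · rintro (h | ⟨c, hc, h⟩)
          · exact Or.inl (Or.inl h)
          · rcases List.mem_cons.mp hc with rfl | hc
            · rw [hchF] at h
              exact Or.inl (Or.inr (by injection h; omega))
            · exact Or.inr ⟨c, hc, h⟩

-- the build loop from any good state
lemma pvBuildFold (ss : List String) (pos0 : PySem.Dict Char Nat) (macc : List Nat)
    (hg : PvPosGood pos0) :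
    PvPosGood (ss.foldl (fun pm s =>
        let r := s.toList.foldl pvBStep (pm.1, 0); (r.1, pm.2 ++ [r.2])) (pos0, macc)).1 ∧
    PvExt pos0 (ss.foldl (fun pm s =>
        let r := s.toList.foldl pvBStep (pm.1, 0); (r.1, pm.2 ++ [r.2])) (pos0, macc)).1 ∧
    (∀ c, (ss.foldl (fun pm s =>
        let r := s.toList.foldl pvBStep (pm.1, 0); (r.1, pm.2 ++ [r.2])) (pos0, macc)).1.contains c = true
      ↔ pos0.contains c = true ∨ ∃ s ∈ ss, c ∈ s.toList) ∧
    ∃ ms : List Nat,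
      (ss.foldl (fun pm s =>
        let r := s.toList.foldl pvBStep (pm.1, 0); (r.1, pm.2 ++ [r.2])) (pos0, macc)).2 = macc ++ ms ∧
      ms.length = ss.length ∧
      ∀ k (hk : k < ss.length) (hk' : k < ms.length) (i : Nat), (ms[k]'hk').testBit i = true ↔
        ∃ ch ∈ (ss[k]).toList, (ss.foldl (fun pm s =>
          let r := s.toList.foldl pvBStep (pm.1, 0); (r.1, pm.2 ++ [r.2])) (pos0, macc)).1.get? ch = some i := by
  induction ss generalizing pos0 macc with
  | nil => exact ⟨hg, fun _ _ h => h, by simp, [], by simp, by simp, by simp⟩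
  | cons s rest ih =>
    obtain ⟨g1, e1, d1, b1⟩ := pvCharFold s.toList pos0 0 hg
    set q := s.toList.foldl pvBStep (pos0, 0) with hq
    have hstep : ∀ st : PySem.Dict Char Nat × List Nat, st = (pos0, macc) →
        (s :: rest).foldl (fun pm s =>
          let r := s.toList.foldl pvBStep (pm.1, 0); (r.1, pm.2 ++ [r.2])) st
        = rest.foldl (fun pm s =>
          let r := s.toList.foldl pvBStep (pm.1, 0); (r.1, pm.2 ++ [r.2])) (q.1, macc ++ [q.2]) := by
      rintro st rfl; rfl
    rw [hstep (pos0, macc) rfl]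
    obtain ⟨g2, e2, d2, ms', hms'eq, hms'len, hms'bit⟩ := ih q.1 (macc ++ [q.2]) g1
    refine ⟨g2, fun c b h => e2 c b (e1 c b h), ?_, q.2 :: ms', ?_, by simp [hms'len], ?_⟩
    · intro c
      rw [d2 c, d1 c]
      constructor
      · rintro ((h | h) | ⟨t, ht, hc⟩)
        · exact Or.inl h
        · exact Or.inr ⟨s, by simp, h⟩
        · exact Or.inr ⟨t, List.mem_cons_of_mem _ ht, hc⟩
      · rintro (h | ⟨t, ht, hc⟩)
        · exact Or.inl (Or.inl h)
        · rcases List.mem_cons.mp ht with rfl | ht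
          · exact Or.inl (Or.inr hc)
          · exact Or.inr ⟨t, ht, hc⟩
    · rw [hms'eq]; simp
    · intro k hk hk' i
      cases k with
      | zero =>
        simp only [List.getElem_cons_zero]
        constructor
        · intro h
          rcases (b1 i).mp h with h | ⟨ch, hch, hgot⟩
          · simp at h
          · exact ⟨ch, hch, e2 ch i hgot⟩
        · rintro ⟨ch, hch, hgot⟩
          have hc1 : q.1.contains ch = true := (d1 ch).mpr (Or.inr hch)
          rcases hb : q.1.get? ch with _ | b
          · rw [PySem.Dict.get?_eq_none_iff_contains] at hb; rw [hc1] at hb; cases hb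
          · have := e2 ch b hb
            rw [this] at hgot
            injection hgot with hbi
            subst hbi
            exact (b1 _).mpr (Or.inr ⟨ch, hch, hb⟩)
      | succ k =>
        have hkr : k < rest.length := by simpa using hk
        simpa using hms'bit k hkr (by simpa using hk') i
lemma pvAnd_eq_iff (sm wm : Nat) :
    sm &&& wm = wm ↔ ∀ i, wm.testBit i = true → sm.testBit i = true := by
  constructor
  · intro h i hi
    have := congrArg (fun x => x.testBit i) h
    simp only [Nat.testBit_and] at this
    rw [hi] at this
    simpa using this
  · intro h
    apply Nat.eq_of_testBit_eq
    intro i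
    rw [Nat.testBit_and]
    rcases hwi : wm.testBit i
    · simp
    · simp [h i hwi]

lemma pvWordMask_none (pos : PySem.Dict Char Nat) (w : List Char) (m : Nat) :
    pvBWordMask pos w m = none ↔ ∃ c ∈ w, pos.get? (PySem.Chars.lowerChar c) = none := by
  induction w generalizing m with
  | nil => simp [pvBWordMask]
  | cons c rest ih =>
    simp only [pvBWordMask]
    rcases h : pos.get? (PySem.Chars.lowerChar c) with _ | b
    · simp [h]
    · simp only [ih, List.mem_cons]
      constructor
      · rintro ⟨x, hx, hn⟩; exact ⟨x, Or.inr hx, hn⟩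
      · rintro ⟨x, hx, hn⟩
        rcases hx with rfl | hx
        · rw [h] at hn; cases hn
        · exact ⟨x, hx, hn⟩

lemma pvWordMask_some (pos : PySem.Dict Char Nat) (w : List Char) (m wm : Nat)
    (h : pvBWordMask pos w m = some wm) :
    ∀ i, wm.testBit i = true ↔
      m.testBit i = true ∨ ∃ c ∈ w, pos.get? (PySem.Chars.lowerChar c) = some i := by
  induction w generalizing m with
  | nil =>
    simp only [pvBWordMask] at h
    injection h with h
    subst h
    simp
  | cons c rest ih =>
    simp only [pvBWordMask] at h
    rcases hc : pos.get? (PySem.Chars.lowerChar c) with _ | b <;> rw [hc] at h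
    · cases h
    · intro i
      rw [ih _ h i, testBit_or_shift]
      constructor
      · rintro ((hm | rfl) | ⟨x, hx, hg⟩)
        · exact Or.inl hm
        · exact Or.inr ⟨c, by simp, hc⟩
        · exact Or.inr ⟨x, List.mem_cons_of_mem _ hx, hg⟩
      · rintro (hm | ⟨x, hx, hg⟩)
        · exact Or.inl (Or.inl hm)
        · rcases List.mem_cons.mp hx with rfl | hx
          · rw [hc] at hg
            exact Or.inl (Or.inr (by injection hg; omega))
          · exact Or.inr ⟨x, hx, hg⟩

-- the per-word tests of the two programs agree
lemma pv_per_word (w : List Char) (strings : List String) :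
    (match pvBWordMask (pvBBuild strings).1 w 0 with
     | none => false
     | some wm => (pvBBuild strings).2.any (fun sm => sm &&& wm == wm)) = pvAFind w strings := by
  have hgood0 : PvPosGood PySem.Dict.empty := by
    constructor <;> intro c <;> simp [PySem.Dict.get?_empty]
  obtain ⟨gF, _, dF, ms, hmseq, hmslen, hmsbit⟩ := pvBuildFold strings PySem.Dict.empty [] hgood0
  have hBB : (strings.foldl (fun pm s =>
      let r := s.toList.foldl pvBStep (pm.1, 0); (r.1, pm.2 ++ [r.2]))
      (PySem.Dict.empty, ([] : List Nat))) = pvBBuild strings := rfl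
  rw [hBB] at gF dF hmseq hmsbit
  have hms : (pvBBuild strings).2 = ms := by rw [hmseq]; simp
  have hdom : ∀ c, (pvBBuild strings).1.contains c = true ↔ ∃ s ∈ strings, c ∈ s.toList := by
    intro c
    rw [dF c]
    simp [PySem.Dict.contains_empty]
  rw [Bool.eq_iff_iff]
  rcases hwm : pvBWordMask (pvBBuild strings).1 w 0 with _ | wm
  · -- some letter occurs in no string: A finds nothing either
    obtain ⟨c, hcw, hcn⟩ := (pvWordMask_none _ w 0).mp hwm
    simp only [Bool.false_eq_true, false_iff]
    rw [pvAFind_eq_any, List.any_eq_true]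
    rintro ⟨s, hs, hok⟩
    rw [pvAWordOk_eq_all, List.all_eq_true] at hok
    have hmem : PySem.Chars.lowerChar c ∈ s.toList := (isIn_singleton _ _).mp (hok c hcw)
    have : (pvBBuild strings).1.contains (PySem.Chars.lowerChar c) = true :=
      (hdom _).mpr ⟨s, hs, hmem⟩
    rw [← Bool.not_eq_false, ← PySem.Dict.get?_eq_none_iff_contains] at this
    exact this hcn
  · -- all letters present: mask subset test ↔ per-string containment
    have hlet : ∀ c ∈ w, ∃ b, (pvBBuild strings).1.get? (PySem.Chars.lowerChar c) = some b := by
      intro c hc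
      rcases hb : (pvBBuild strings).1.get? (PySem.Chars.lowerChar c) with _ | b
      · exfalso
        have hn : pvBWordMask (pvBBuild strings).1 w 0 = none :=
          (pvWordMask_none _ w 0).mpr ⟨c, hc, hb⟩
        rw [hn] at hwm; cases hwm
      · exact ⟨b, rfl⟩
    have hwmbit := pvWordMask_some _ w 0 wm hwm
    rw [hms, List.any_eq_true, pvAFind_eq_any, List.any_eq_true]
    constructor
    · rintro ⟨sm, hsm, hand⟩
      obtain ⟨k, hk, rfl⟩ := List.mem_iff_getElem.mp hsm
      have hklt : k < strings.length := by omega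
      refine ⟨strings[k], List.getElem_mem hklt, ?_⟩
      rw [pvAWordOk_eq_all, List.all_eq_true]
      intro c hc
      rw [isIn_singleton]
      obtain ⟨b, hb⟩ := hlet c hc
      have hwb : wm.testBit b = true := (hwmbit b).mpr (Or.inr ⟨c, hc, hb⟩)
      rw [beq_iff_eq, pvAnd_eq_iff] at hand
      have hsb := hand b hwb
      obtain ⟨ch, hch, hchg⟩ := (hmsbit k (by omega) hk b).mp hsb
      have : ch = PySem.Chars.lowerChar c := gF.2 ch (PySem.Chars.lowerChar c) b hchg hb
      rwa [this] at hch
    · rintro ⟨s, hs, hok⟩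
      obtain ⟨k, hklt, rfl⟩ := List.mem_iff_getElem.mp hs
      rw [pvAWordOk_eq_all, List.all_eq_true] at hok
      refine ⟨ms[k]'(by omega), List.getElem_mem (by omega), ?_⟩
      rw [beq_iff_eq, pvAnd_eq_iff]
      intro i hi
      rcases (hwmbit i).mp hi with h | ⟨c, hc, hg⟩
      · simp at h
      · have hmem : PySem.Chars.lowerChar c ∈ strings[k].toList :=
          (isIn_singleton _ _).mp (hok c hc)
        exact (hmsbit k (by omega) (by omega) i).mpr ⟨PySem.Chars.lowerChar c, hmem, hg⟩

theorem get_required_words_spec : Claim_equal_get_required_words := by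
  intro words strings _
  unfold Spec_get_required_words get_required_words get_required_words_alt
  refine PySem.List.foldl_congr_mem' words _ _ 0 ?_
  intro w _ acc
  have h := pv_per_word w.toList strings
  rw [← h]
  rcases hwm : pvBWordMask (pvBBuild strings).1 w.toList 0 with _ | wm
  · simp
  · rfl
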